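-- pv_equiv track=rewrite | github.com/andrewhamara/leetcode | py/1287.py | findSpecialInteger
-- ===== SOURCE A (Python) =====
-- from typing import List
--
-- def findSpecialInteger(arr: List[int]) -> int:
--     x = len(arr) / 4
--
--     freq = {}
--
--     for n in arr:
--         cur = freq.get(n, 0) + 1
--
--         if float(cur) > x:
--             return n
--         freq[n] = cur
-- ===== SOURCE B (Python) =====
-- from typing import List
--
-- def findSpecialInteger(arr: List[int]) -> int:
--     # Candidate-based: group the indices of each value, then return the element
--     # whose k-th occurrence (k = len(arr)//4 + 1) comes earliest in the array.
--     k = len(arr) // 4 + 1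
--     pos = {}
--     for i, w in enumerate(arr):
--         pos.setdefault(w, []).append(i)
--     best = None
--     for ps in pos.values():
--         if len(ps) >= k:
--             j = ps[k - 1]
--             if best is None or j < best:
--                 best = j
--     return arr[best] if best is not None else None
-- ===== Notes on version B (the rewrite author's own statement) =====
-- stated objective: alternative
-- what changed: B replaces A's left-to-right scan with a running frequency dict and float threshold test by a candidate-based selection: it groups the occurrence indices of each value in one pass and returns the element whose k-th occurrence (k = n//4 + 1) comes earliest.
import Mathlib
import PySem

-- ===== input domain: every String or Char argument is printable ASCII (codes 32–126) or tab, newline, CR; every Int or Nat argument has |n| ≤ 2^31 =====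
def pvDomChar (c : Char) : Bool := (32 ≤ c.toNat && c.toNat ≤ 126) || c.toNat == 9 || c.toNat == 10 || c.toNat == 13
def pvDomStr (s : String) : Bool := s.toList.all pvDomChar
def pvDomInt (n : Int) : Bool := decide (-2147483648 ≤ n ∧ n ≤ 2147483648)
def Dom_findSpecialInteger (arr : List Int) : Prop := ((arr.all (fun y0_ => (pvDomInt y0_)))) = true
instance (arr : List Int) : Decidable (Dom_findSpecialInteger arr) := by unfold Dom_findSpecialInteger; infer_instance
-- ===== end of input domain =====

-- B replaces A's single running-count scan with a candidate-based selection over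
-- the distinct values (earliest k-th occurrence wins); alternative algorithm, no speed claim.
-- Python's `len(arr)/4` and `float(cur) > x` are exact here (dyadic rational vs integer,
-- |values| far below 2^53), so A's float comparison is ported exactly as a ℚ comparison.

-- ===== PORT A =====
-- the for-loop over arr with the mutable dict `freq`
def pvAgo (x : ℚ) : PySem.Dict Int Int → List Int → Option Int
  | _, [] => none
  | freq, n :: rest =>
    let cur := freq.getD n 0 + 1
    if (cur : ℚ) > x then some n else pvAgo x (freq.insert n cur) rest

def findSpecialInteger (arr : List Int) : Option Int :=
  pvAgo ((arr.length : ℚ) / 4) PySem.Dict.empty arr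

-- ===== PORT B =====
-- the grouping loop: for i, w in enumerate(arr): pos.setdefault(w, []).append(i)
def pvPos (arr : List Int) : PySem.Dict Int (List Int) :=
  (PySem.List.enumerate arr 0).foldl (fun d p => d.modify p.2 [] (· ++ [p.1])) PySem.Dict.empty

-- the for-loop over pos.values(), keeping the earliest k-th-occurrence index in `best`
def pvBestLoop (k : Int) : List (List Int) → Option Int → Option Int
  | [], best => best
  | ps :: rest, best =>
    if k ≤ (ps.length : Int) then
      -- ps[k-1]: in range since 1 ≤ k ≤ len(ps) under the guard, so getD's default is dead
      let j := (PySem.List.pyGet? ps (k - 1)).getD 0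
      pvBestLoop k rest
        (match best with
         | none => some j
         | some b => if j < b then some j else some b)
    else pvBestLoop k rest best

def findSpecialInteger_alt (arr : List Int) : Option Int :=
  let k : Int := PySem.Int.floordiv (arr.length : Int) 4 + 1
  match pvBestLoop k (pvPos arr).values none with
  | some b => PySem.List.pyGet? arr b   -- arr[best]: in range, best is a valid index
  | none => none

-- ===== PRECONDITION & SPEC =====
def Spec_findSpecialInteger (arr : List Int) (out : Option Int) : Prop := out = findSpecialInteger_alt arr
instance (arr : List Int) (out : Option Int) : Decidable (Spec_findSpecialInteger arr out) := by unfold Spec_findSpecialInteger; infer_instance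

-- ===== CLAIM (what is proved, stated in full; the proofs are below) =====
def Claim_equal_findSpecialInteger : Prop := ∀ (arr : List Int), Dom_findSpecialInteger arr → Spec_findSpecialInteger arr (findSpecialInteger arr)

-- ===== LEMMAS AND PROOFS =====

-- occurrence-index list of value v (what pos[v] ends up being)
def pvOcc (arr : List Int) (v : Int) : List Int :=
  (PySem.List.enumerate arr 0).filterMap (fun p => if p.2 = v then some p.1 else none)

-- running count of arr[i] in arr[:i+1]
def pvCnt (arr : List Int) (i : Nat) : Nat := (arr.take (i+1)).count (arr.getD i 0)

-- first index ≥ i whose running count reaches k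
def pvFirst (arr : List Int) (k : Nat) (i : Nat) : Option Nat :=
  if h : i < arr.length then
    (if k ≤ pvCnt arr i then some i else pvFirst arr k (i+1))
  else none
termination_by arr.length - i

-- Nat-level occurrence-index list (pvOcc with the offset made explicit)
def pvOccN : List Int → Int → Nat → List Nat
  | [], _, _ => []
  | a :: t, v, s => if a = v then s :: pvOccN t v (s+1) else pvOccN t v (s+1)

lemma pvOcc_eq_occN (t : List Int) (v : Int) (s : Nat) :
    (PySem.List.enumerate t (s : Int)).filterMap (fun p => if p.2 = v then some p.1 else none)
      = (pvOccN t v s).map Int.ofNat := by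
  induction t generalizing s with
  | nil => simp [PySem.List.enumerate_nil, pvOccN]
  | cons a t ih =>
    rw [PySem.List.enumerate_cons, List.filterMap_cons]
    have hs1 : (s : Int) + 1 = ((s + 1 : Nat) : Int) := by push_cast; ring
    rw [hs1, ih (s+1)]
    by_cases h : a = v <;> simp [pvOccN, h]

lemma pvOcc_def (arr : List Int) (v : Int) : pvOcc arr v = (pvOccN arr v 0).map Int.ofNat := by
  have := pvOcc_eq_occN arr v 0
  simpa [pvOcc] using this

lemma pvOccN_length (t : List Int) (v : Int) (s : Nat) :
    (pvOccN t v s).length = t.count v := by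
  induction t generalizing s with
  | nil => simp [pvOccN]
  | cons a t ih =>
    by_cases h : a = v <;> simp [pvOccN, h, ih (s+1)]

-- forward characterisation: the m-th occurrence index
lemma pvOccN_get (t : List Int) (v : Int) (s m j : Nat)
    (h : (pvOccN t v s)[m]? = some j) :
    ∃ j', j = s + j' ∧ j' < t.length ∧ t.getD j' 0 = v ∧ (t.take (j'+1)).count v = m + 1 := by
  induction t generalizing s m with
  | nil => simp [pvOccN] at h
  | cons a t ih =>
    by_cases hav : a = v
    · rw [pvOccN, if_pos hav] at h
      cases m with
      | zero =>
        simp at h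
        exact ⟨0, by omega, by simp, by simpa using hav, by simp [hav]⟩
      | succ m =>
        simp only [List.getElem?_cons_succ] at h
        obtain ⟨j', rfl, hlt, hget, hcnt⟩ := ih (s+1) m h
        refine ⟨j' + 1, by omega, by simp; omega, by simpa using hget, ?_⟩
        simp [hav, hcnt]
    · rw [pvOccN, if_neg hav] at h
      obtain ⟨j', rfl, hlt, hget, hcnt⟩ := ih (s+1) m h
      refine ⟨j' + 1, by omega, by simp; omega, by simpa using hget, ?_⟩
      simp [hav, hcnt]

-- existence: if the prefix up to i already holds m+1 copies of v, the (m+1)-th occurrence is ≤ i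
lemma pvOccN_exists (t : List Int) (v : Int) (s m i : Nat)
    (hi : i < t.length) (hc : m + 1 ≤ (t.take (i+1)).count v) :
    ∃ j, (pvOccN t v s)[m]? = some j ∧ j ≤ s + i := by
  induction t generalizing s m i with
  | nil => simp at hi
  | cons a t ih =>
    by_cases hav : a = v
    · rw [pvOccN, if_pos hav]
      cases m with
      | zero => exact ⟨s, by simp, by omega⟩
      | succ m =>
        have hi1 : 1 ≤ i := by
          by_contra h
          have : i = 0 := by omega
          subst this
          simp [hav] at hc
        obtain ⟨i', rfl⟩ : ∃ i', i = i' + 1 := ⟨i - 1, by omega⟩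
        have hc' : m + 1 ≤ (t.take (i'+1)).count v := by
          simp [hav] at hc
          omega
        obtain ⟨j, hj, hle⟩ := ih (s+1) m i' (by simpa using hi) hc'
        exact ⟨j, by simpa using hj, by omega⟩
    · rw [pvOccN, if_neg hav]
      have hi1 : 1 ≤ i := by
        by_contra h
        have : i = 0 := by omega
        subst this
        simp [hav] at hc
      obtain ⟨i', rfl⟩ : ∃ i', i = i' + 1 := ⟨i - 1, by omega⟩
      have hc' : m + 1 ≤ (t.take (i'+1)).count v := by
        simpa [hav] using hc
      obtain ⟨j, hj, hle⟩ := ih (s+1) m i' (by simpa using hi) hc'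
      exact ⟨j, hj, by omega⟩

-- threshold: float(cur) > len/4  ↔  len//4 + 1 ≤ cur   (cur = c+1, all integers)
lemma pv_thresh (c L : Nat) :
    ((((c : Int) + 1 : Int) : ℚ) > (L : ℚ) / 4) ↔ L / 4 + 1 ≤ c + 1 := by
  rw [gt_iff_lt, div_lt_iff₀ (by norm_num : (0:ℚ) < 4)]
  have h1 : (((c : Int) + 1 : Int) : ℚ) * 4 = ((4 * (c + 1) : Nat) : ℚ) := by push_cast; ring
  rw [h1, Nat.cast_lt]
  omega

-- properties of pvFirst
lemma pvFirst_none (arr : List Int) (k : Nat) :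
    ∀ s, pvFirst arr k s = none → ∀ i, s ≤ i → i < arr.length → pvCnt arr i < k := by
  intro s
  fun_induction pvFirst arr k s with
  | case1 s hs hhit =>
    intro h; simp at h
  | case2 s hs hmiss ih =>
    intro h i hsi hil
    rcases Nat.eq_or_lt_of_le hsi with rfl | hlt
    · omega
    · exact ih h i hlt hil
  | case3 s hs =>
    intro _ i hsi hil
    omega

lemma pvFirst_some (arr : List Int) (k : Nat) :
    ∀ s i, pvFirst arr k s = some i →
      s ≤ i ∧ i < arr.length ∧ k ≤ pvCnt arr i ∧ ∀ m, s ≤ m → m < i → pvCnt arr m < k := by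
  intro s
  fun_induction pvFirst arr k s with
  | case1 s hs hhit =>
    intro i h
    simp at h
    subst h
    exact ⟨le_refl _, hs, hhit, fun m h1 h2 => by omega⟩
  | case2 s hs hmiss ih =>
    intro i h
    obtain ⟨h1, h2, h3, h4⟩ := ih i h
    refine ⟨by omega, h2, h3, ?_⟩
    intro m hm1 hm2
    rcases Nat.eq_or_lt_of_le hm1 with rfl | hlt
    · omega
    · exact h4 m hlt hm2
  | case3 s hs =>
    intro i h
    simp at h

-- A characterisation: the scan stops at the first index whose running count reaches k
lemma pvA_char (arr : List Int) (rest p : List Int) (freq : PySem.Dict Int Int)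
    (h : arr = p ++ rest) (hf : ∀ v, freq.getD v 0 = (p.count v : Int)) :
    pvAgo ((arr.length : ℚ) / 4) freq rest
      = (pvFirst arr (arr.length / 4 + 1) p.length).map (fun i => arr.getD i 0) := by
  induction rest generalizing p freq with
  | nil =>
    have hp : ¬ p.length < arr.length := by simp [h]
    rw [pvFirst, dif_neg hp]
    simp [pvAgo]
  | cons v rest' ih =>
    have hlen : p.length < arr.length := by simp [h]
    have hget : arr.getD p.length 0 = v := by
      rw [h]; simp
    have htake : arr.take (p.length + 1) = p ++ [v] := by
      rw [h, List.take_append]; simp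
    have hcnt : pvCnt arr p.length = p.count v + 1 := by
      rw [pvCnt, hget, htake]; simp
    rw [pvFirst, dif_pos hlen]
    show (if ((freq.getD v 0 + 1 : Int) : ℚ) > (arr.length : ℚ) / 4 then some v
          else pvAgo ((arr.length : ℚ) / 4) (freq.insert v (freq.getD v 0 + 1)) rest')
        = _
    rw [hf v]
    by_cases hc : arr.length / 4 + 1 ≤ pvCnt arr p.length
    · rw [if_pos (by rw [(pv_thresh (p.count v) arr.length)]; omega), if_pos hc]
      simp only [Option.map_some]
      rw [hget]
    · rw [if_neg (by rw [(pv_thresh (p.count v) arr.length)]; omega), if_neg hc]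
      have hstep := ih (p ++ [v]) (freq.insert v ((p.count v : Int) + 1))
        (by simpa using h)
        (by
          intro w
          rw [PySem.Dict.getD_insert]
          by_cases hw : w = v
          · subst hw
            rw [if_pos rfl]
            simp [List.count_append]
          · rw [if_neg hw, hf w]
            simp [List.count_append, List.count_cons]
            exact fun e => hw e.symm)
      simpa using hstep

-- candidate list of the B loop (one entry per index list holding at least k indices)
def pvCandLists (k : Int) (pss : List (List Int)) : List Int :=
  pss.filterMap (fun ps =>
    if k ≤ (ps.length : Int) then some ((PySem.List.pyGet? ps (k - 1)).getD 0) else none)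

def pvCandList (arr : List Int) (k : Int) (vs : List Int) : List Int :=
  pvCandLists k (vs.map (fun v => pvOcc arr v))

lemma pvLoop_some (k : Int) (pss : List (List Int)) (b : Int) :
    pvBestLoop k pss (some b) = some ((pvCandLists k pss).foldl min b) := by
  induction pss generalizing b with
  | nil => simp [pvBestLoop, pvCandLists]
  | cons ps pss ih =>
    by_cases h : k ≤ ((ps.length : Nat) : Int)
    · rw [pvBestLoop, if_pos h]
      have hm : (if (PySem.List.pyGet? ps (k - 1)).getD 0 < b
            then some ((PySem.List.pyGet? ps (k - 1)).getD 0) else some b)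
          = some (min b ((PySem.List.pyGet? ps (k - 1)).getD 0)) := by
        split_ifs with hlt <;> simp [min_def] <;> omega
      simp only [hm, ih]
      simp [pvCandLists, h]
    · rw [pvBestLoop, if_neg h, ih]
      simp [pvCandLists, h]

lemma pvLoop_none (k : Int) (pss : List (List Int)) :
    pvBestLoop k pss none = PySem.List.min? (pvCandLists k pss) (fun y => y) := by
  induction pss with
  | nil => rfl
  | cons ps pss ih =>
    by_cases h : k ≤ ((ps.length : Nat) : Int)
    · rw [pvBestLoop, if_pos h]
      simp only [pvLoop_some]
      have hc : pvCandLists k (ps :: pss)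
          = ((PySem.List.pyGet? ps (k - 1)).getD 0) :: pvCandLists k pss := by
        simp [pvCandLists, h]
      rw [hc, PySem.List.min?_id_cons]
    · rw [pvBestLoop, if_neg h, ih]
      simp [pvCandLists, h]

-- the grouping dict maps every value to its occurrence-index list, keys in first-occurrence order
lemma pvPos_getD (arr : List Int) (v : Int) : (pvPos arr).getD v [] = pvOcc arr v := by
  have hswap : pvPos arr
      = ((PySem.List.enumerate arr 0).map (fun p => (p.2, p.1))).foldl
          (fun d p => d.modify p.1 [] (· ++ [p.2])) PySem.Dict.empty := by
    rw [pvPos, List.foldl_map]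
  rw [hswap, PySem.Dict.getD_foldl_modify_append]
  have hgen : ∀ l : List (Int × Int),
      ((l.filter (fun p => p.2 == v)).map (fun p => p.1))
        = l.filterMap (fun p => if p.2 = v then some p.1 else none) := by
    intro l
    induction l with
    | nil => rfl
    | cons p l ih =>
      by_cases h : p.2 = v <;> simp [h, ih]
  simp only [PySem.Dict.getD_empty, List.nil_append, List.filter_map, List.map_map]
  show ((PySem.List.enumerate arr 0).filter (fun p => p.2 == v)).map (fun p => p.1) = pvOcc arr v
  rw [hgen]
  rfl

lemma pvPos_keys (arr : List Int) : (pvPos arr).keys = PySem.List.dedup arr := by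
  have h := PySem.Dict.keys_foldl_modify_key (PySem.List.enumerate arr 0)
    (fun p : Int × Int => p.2) ([] : List Int)
    (fun _ p l => l ++ [p.1]) (PySem.Dict.empty : PySem.Dict Int (List Int))
  rw [PySem.List.map_snd_enumerate] at h
  have h2 : PySem.Set.update (PySem.Dict.empty : PySem.Dict Int (List Int)).keys arr
      = PySem.List.dedup arr := by
    simp [PySem.List.dedup_eq_ofList, PySem.Set.ofList_eq_foldl, PySem.Set.update,
      PySem.Dict.keys_empty]
  rw [pvPos]
  exact h.trans h2

lemma pvPos_values (arr : List Int) :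
    (pvPos arr).values = (PySem.List.dedup arr).map (fun v => pvOcc arr v) := by
  have hnd : (pvPos arr).keys.Nodup := by
    rw [pvPos]
    exact PySem.Dict.nodup_keys_foldl_modify_key (PySem.List.enumerate arr 0)
      (fun p : Int × Int => p.2) ([] : List Int) (fun _ p l => l ++ [p.1]) PySem.Dict.empty
      (by simp [PySem.Dict.keys_empty])
  have hvals : (pvPos arr).values = (pvPos arr).keys.map (fun v => (pvPos arr).getD v []) := by
    show (pvPos arr).items.map (fun p => p.2)
        = ((pvPos arr).items.map (fun p => p.1)).map (fun v => (pvPos arr).getD v [])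
    rw [List.map_map]
    refine List.map_congr_left ?_
    intro p hp
    exact (PySem.Dict.getD_of_mem_items (pvPos arr) (by exact hp) hnd []).symm
  rw [hvals, pvPos_keys]
  exact List.map_congr_left (fun v _ => pvPos_getD arr v)

-- the value a candidate v contributes-- the value a candidate v contributes: occ[k-1] computed through pvOccN
lemma pvCand_val (arr : List Int) (v : Int) (k : Nat) (hk : 1 ≤ k)
    (hlen : k ≤ (pvOccN arr v 0).length) :
    ∃ jn : Nat, (pvOccN arr v 0)[k-1]? = some jn ∧
      (PySem.List.pyGet? (pvOcc arr v) ((k : Int) - 1)).getD 0 = (jn : Int) := by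
  have hklt : k - 1 < (pvOccN arr v 0).length := by omega
  refine ⟨(pvOccN arr v 0)[k-1], List.getElem?_eq_getElem hklt, ?_⟩
  have hcast : ((k : Int) - 1) = (((k - 1 : Nat)) : Int) := by omega
  rw [pvOcc_def, hcast, PySem.List.pyGet?_natCast]
  simp [List.getElem?_map, List.getElem?_eq_getElem hklt]

-- every candidate index is the k-th occurrence of its value: a "hit" with running count exactly k
lemma pvCand_mem (arr : List Int) (k : Nat) (hk : 1 ≤ k) (j : Int)
    (hj : j ∈ pvCandList arr (k : Int) (PySem.List.dedup arr)) :
    ∃ jn : Nat, j = (jn : Int) ∧ jn < arr.length ∧ pvCnt arr jn = k := by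
  simp only [pvCandList, pvCandLists, List.filterMap_map, List.mem_filterMap,
    Function.comp] at hj
  obtain ⟨v, hv, hcond⟩ := hj
  split_ifs at hcond with hguard
  have hlen : k ≤ (pvOccN arr v 0).length := by
    have h2 : k ≤ (pvOcc arr v).length := by exact_mod_cast hguard
    rwa [pvOcc_def, List.length_map] at h2
  obtain ⟨jn, hjn, hval⟩ := pvCand_val arr v k hk hlen
  obtain ⟨j', hj0, hjlt, hjget, hjcnt⟩ := pvOccN_get arr v 0 (k-1) jn hjn
  have hj' : j' = jn := by omega
  subst hj'
  have hjv : j = (j' : Int) := by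
    rw [hval] at hcond
    exact (Option.some_inj.mp hcond).symm
  refine ⟨j', hjv, hjlt, ?_⟩
  have hk' : k - 1 + 1 = k := by omega
  rw [hk'] at hjcnt
  rw [pvCnt, hjget]
  exact hjcnt

-- for every hit i there is a candidate index ≤ i (the k-th occurrence of arr[i])
lemma pvCand_exists (arr : List Int) (k : Nat) (hk : 1 ≤ k) (i : Nat)
    (hi : i < arr.length) (hcnt : k ≤ pvCnt arr i) :
    ∃ jn : Nat, (jn : Int) ∈ pvCandList arr (k : Int) (PySem.List.dedup arr) ∧ jn ≤ i := by
  have hvmem : arr.getD i 0 ∈ arr := by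
    rw [List.getD_eq_getElem arr 0 hi]; exact List.getElem_mem hi
  rw [pvCnt] at hcnt
  obtain ⟨jn, hjn, hle⟩ := pvOccN_exists arr (arr.getD i 0) 0 (k-1) i hi (by omega)
  have hlenocc : k ≤ (pvOccN arr (arr.getD i 0) 0).length := by
    rw [pvOccN_length]
    exact le_trans hcnt ((List.take_sublist _ arr).count_le _)
  obtain ⟨jn', hjn', hval⟩ := pvCand_val arr (arr.getD i 0) k hk hlenocc
  have hjj : jn' = jn := Option.some_inj.mp (hjn'.symm.trans hjn)
  subst hjj
  refine ⟨jn', ?_, by omega⟩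
  simp only [pvCandList, pvCandLists, List.filterMap_map, List.mem_filterMap, Function.comp]
  refine ⟨arr.getD i 0, by rw [PySem.List.mem_dedup]; exact hvmem, ?_⟩
  show (if (k : Int) ≤ ((pvOcc arr (arr.getD i 0)).length : Int)
        then some ((PySem.List.pyGet? (pvOcc arr (arr.getD i 0)) ((k : Int) - 1)).getD 0)
        else none) = some ((jn' : Nat) : Int)
  rw [if_pos (by rw [pvOcc_def, List.length_map]; exact_mod_cast hlenocc), hval]

-- B characterisation: B also returns the value at the first index whose running count reaches k
lemma pvB_char (arr : List Int) :
    findSpecialInteger_alt arr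
      = (pvFirst arr (arr.length / 4 + 1) 0).map (fun i => arr.getD i 0) := by
  have hkI : PySem.Int.floordiv (arr.length : Int) 4 + 1 = ((arr.length / 4 + 1 : Nat) : Int) := by
    rw [show ((4:Int)) = ((4:Nat):Int) by norm_num, PySem.Int.floordiv_natCast]
    omega
  set k : Nat := arr.length / 4 + 1 with hk
  have hk1 : 1 ≤ k := by omega
  show (match pvBestLoop (PySem.Int.floordiv (arr.length : Int) 4 + 1) (pvPos arr).values none with
        | some b => PySem.List.pyGet? arr b
        | none => none) = _
  rw [hkI, pvPos_values, pvLoop_none,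
    show pvCandLists ((k : Nat) : Int) ((PySem.List.dedup arr).map (fun v => pvOcc arr v))
      = pvCandList arr ((k : Nat) : Int) (PySem.List.dedup arr) from rfl]
  cases hF : pvFirst arr k 0 with
  | none =>
    have hempty : pvCandList arr (k : Int) (PySem.List.dedup arr) = [] := by
      cases hC : pvCandList arr (k : Int) (PySem.List.dedup arr) with
      | nil => rfl
      | cons j l =>
        obtain ⟨jn, rfl, hjl, hjc⟩ :=
          pvCand_mem arr k hk1 j (by rw [hC]; exact List.mem_cons_self)
        have := pvFirst_none arr k 0 hF jn (Nat.zero_le _) hjl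
        omega
    rw [hempty]
    rfl
  | some i0 =>
    obtain ⟨-, hi0L, hi0cnt, hmin⟩ := pvFirst_some arr k 0 i0 hF
    obtain ⟨jn, hjmem, hjle⟩ := pvCand_exists arr k hk1 i0 hi0L hi0cnt
    have hjn_i0 : jn = i0 := by
      obtain ⟨jn2, hje, hjl2, hjc2⟩ := pvCand_mem arr k hk1 _ hjmem
      have hjn2 : jn = jn2 := by exact_mod_cast hje
      subst hjn2
      by_cases hlt : jn < i0
      · have := hmin jn (Nat.zero_le _) hlt; omega
      · omega
    subst hjn_i0
    cases hM : PySem.List.min? (pvCandList arr (k : Int) (PySem.List.dedup arr)) (fun y => y) with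
    | none =>
      rw [PySem.List.min?_eq_none_iff] at hM
      rw [hM] at hjmem
      simp at hjmem
    | some m =>
      obtain ⟨mn, rfl, hml, hmc⟩ := pvCand_mem arr k hk1 m (PySem.List.min?_mem hM)
      have hle1 : (mn : Int) ≤ ((jn : Nat) : Int) := PySem.List.min?_isMin hM _ hjmem
      have hge : ¬ mn < jn := fun hlt => by have := hmin mn (Nat.zero_le _) hlt; omega
      have hmn : mn = jn := by
        have : mn ≤ jn := by exact_mod_cast hle1
        omega
      subst hmn
      show PySem.List.pyGet? arr ((mn : Nat) : Int) = _
      rw [PySem.List.pyGet?_natCast, List.getElem?_eq_getElem hi0L]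
      simp [List.getElem?_eq_getElem hml]

-- ===== VERDICT (by name: the statement is the Claim_ definition above) =====
theorem findSpecialInteger_spec : Claim_equal_findSpecialInteger := by
  intro arr _
  unfold Spec_findSpecialInteger
  rw [pvB_char]
  unfold findSpecialInteger
  exact pvA_char arr arr [] PySem.Dict.empty (by simp)
    (by intro v; simp [PySem.Dict.getD, PySem.Dict.get?, PySem.Dict.empty])
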